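-- pv_equiv track=rewrite | github.com/drivenow/RPA | src/tools_crawl/src/proxy_handler.py | _match_url_pattern
-- ===== SOURCE A (Python) =====
-- def _match_url_pattern(url: str, pattern: str) -> bool:
--     """匹配URL模式"""
--     # 支持通配符匹配
--     if '*' in pattern:
--         # 简单的通配符匹配
--         pattern_parts = pattern.split('*')
--         url_check = url
--         for part in pattern_parts:
--             if part and part not in url_check:
--                 return False
--             if part:
--                 url_check = url_check[url_check.find(part) + len(part):]
--         return True
--     else:
--         # 直接字符串匹配
--         return pattern in url
-- ===== SOURCE B (Python) =====
-- def _match_url_pattern(url: str, pattern: str) -> bool: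
--     if '*' in pattern:
--         # single left-to-right scan: advance a cursor through the url,
--         # matching the split parts in order with startswith
--         parts = pattern.split('*')
--         k = 0
--         pos = 0
--         while k < len(parts):
--             part = parts[k]
--             if url.startswith(part, pos):
--                 pos += len(part)
--                 k += 1
--             elif pos < len(url):
--                 pos += 1
--             else:
--                 return False
--         return True
--     else:
--         return pattern in url
-- ===== Notes on version B (the rewrite author's own statement) =====
-- stated objective: alternative
-- what changed: A's per-part loop that tests membership, calls find, and re-slices the remaining url string is replaced by a single left-to-right cursor scan of the url that matches the split parts in order with startswith and never copies a substring.
import Mathlib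
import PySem

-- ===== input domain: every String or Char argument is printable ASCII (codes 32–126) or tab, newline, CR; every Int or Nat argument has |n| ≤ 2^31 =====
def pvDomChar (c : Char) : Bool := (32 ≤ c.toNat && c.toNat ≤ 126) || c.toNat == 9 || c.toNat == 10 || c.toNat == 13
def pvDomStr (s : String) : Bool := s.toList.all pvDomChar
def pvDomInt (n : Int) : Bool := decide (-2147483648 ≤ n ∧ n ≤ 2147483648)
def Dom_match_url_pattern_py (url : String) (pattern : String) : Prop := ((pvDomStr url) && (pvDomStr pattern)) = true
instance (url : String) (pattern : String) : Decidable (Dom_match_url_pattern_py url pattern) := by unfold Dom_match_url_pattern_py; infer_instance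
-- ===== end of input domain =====

-- B replaces A's slice-and-find loop over the parts by a single left-to-right
-- cursor scan of the url matching each part with startswith (objective: alternative).

-- ===== PORT A =====
-- the 'for part in pattern_parts' loop over state url_check
def pvALoop : List (List Char) → List Char → Bool
  | [], _ => true
  | p :: ps, u =>
    if (!p.isEmpty) && !(PySem.Chars.isIn p u) then false
    else if !p.isEmpty then
      pvALoop ps (PySem.List.slice u (some (PySem.Chars.find u p + (p.length : Int))) none)
    else pvALoop ps u

def match_url_pattern_py (url : String) (pattern : String) : Bool :=
  if PySem.Str.isIn "*" pattern then
    pvALoop (PySem.Chars.splitOn pattern.toList ['*']) url.toList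
  else
    PySem.Str.isIn pattern url

-- ===== PORT B =====
-- Source B's while loop over the cursor state (k, pos);
-- url.startswith(part, pos) is Chars.startswith (url.drop pos) part — exact for 0 ≤ pos
def pvBLoop (parts : List (List Char)) (url : List Char) (k : Nat) (pos : Nat) : Bool :=
  if hk : k < parts.length then
    let part := parts[k]
    if PySem.Chars.startswith (url.drop pos) part then
      pvBLoop parts url (k + 1) (pos + part.length)
    else if pos < url.length then
      pvBLoop parts url k (pos + 1)
    else false
  else true
termination_by (parts.length - k, url.length - pos)
decreasing_by
  · apply Prod.Lex.left; omega
  · apply Prod.Lex.right; omega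

def match_url_pattern_py_alt (url : String) (pattern : String) : Bool :=
  if PySem.Str.isIn "*" pattern then
    pvBLoop (PySem.Chars.splitOn pattern.toList ['*']) url.toList 0 0
  else
    PySem.Str.isIn pattern url

-- ===== PRECONDITION & SPEC =====
def Spec_match_url_pattern_py (url : String) (pattern : String) (out : Bool) : Prop := out = match_url_pattern_py_alt url pattern
instance (url : String) (pattern : String) (out : Bool) : Decidable (Spec_match_url_pattern_py url pattern out) := by unfold Spec_match_url_pattern_py; infer_instance

-- ===== CLAIM (what is proved, stated in full; the proofs are below) =====
def Claim_equal_match_url_pattern_py : Prop := ∀ (url : String) (pattern : String), Dom_match_url_pattern_py url pattern → Spec_match_url_pattern_py url pattern (match_url_pattern_py url pattern)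

-- ===== LEMMAS AND PROOFS =====

-- find points at n when a first occurrence sits at n
theorem pv_find_eq_of (s p : List Char) (n : Nat) (h1 : p <+: s.drop n)
    (h2 : ∀ i < n, ¬ p <+: s.drop i) : PySem.Chars.find s p = n := by
  have hinf : p <:+: s := h1.isInfix.trans (List.drop_suffix n s).isInfix
  have hnn : 0 ≤ PySem.Chars.find s p := (PySem.Chars.find_nonneg_iff s p).mpr hinf
  obtain ⟨hpre, hmin⟩ := PySem.Chars.find_spec hnn
  have hne : (PySem.Chars.find s p).toNat = n := by
    rcases Nat.lt_trichotomy (PySem.Chars.find s p).toNat n with hlt | heq | hgt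
    · exact absurd hpre (h2 _ hlt)
    · exact heq
    · exact absurd h1 (hmin n hgt)
  omega

theorem pv_find_prefix_zero (s p : List Char) (h : p <+: s) : PySem.Chars.find s p = 0 := by
  exact pv_find_eq_of s p 0 (by simpa using h) (by omega)

theorem pv_isIn_cons_of_not_prefix (p : List Char) (c : Char) (t : List Char)
    (h : ¬ p <+: (c :: t)) : PySem.Chars.isIn p (c :: t) = PySem.Chars.isIn p t := by
  cases hcase : PySem.Chars.isIn p t with
  | true =>
    obtain ⟨j, hj⟩ := (PySem.Chars.exists_prefix_drop_iff_isIn p t).mpr hcase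
    exact (PySem.Chars.exists_prefix_drop_iff_isIn p (c :: t)).mp ⟨j + 1, by simpa using hj⟩
  | false =>
    cases hcase2 : PySem.Chars.isIn p (c :: t) with
    | false => rfl
    | true =>
      obtain ⟨j, hj⟩ := (PySem.Chars.exists_prefix_drop_iff_isIn p (c :: t)).mpr hcase2
      cases j with
      | zero => exact absurd (by simpa using hj) h
      | succ j' =>
        have : PySem.Chars.isIn p t = true :=
          (PySem.Chars.exists_prefix_drop_iff_isIn p t).mp ⟨j', by simpa using hj⟩
        simp [this] at hcase

theorem pv_find_cons_succ (p : List Char) (c : Char) (t : List Char)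
    (hnp : ¬ p <+: (c :: t)) (hin : PySem.Chars.isIn p t = true) :
    PySem.Chars.find (c :: t) p = PySem.Chars.find t p + 1 := by
  have hinf : p <:+: t := (PySem.Chars.isIn_iff_infix p t).mp hin
  have hnn : 0 ≤ PySem.Chars.find t p := (PySem.Chars.find_nonneg_iff t p).mpr hinf
  obtain ⟨hpre, hmin⟩ := PySem.Chars.find_spec hnn
  have heq : PySem.Chars.find (c :: t) p = ((PySem.Chars.find t p).toNat + 1 : Nat) := by
    apply pv_find_eq_of
    · simpa using hpre
    · intro i hi
      cases i with
      | zero => simpa using hnp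
      | succ i' =>
        have : i' < (PySem.Chars.find t p).toNat := by omega
        simpa using hmin i' this
  omega

-- A's loop ignores a character the pending nonempty part does not start at
theorem pv_aloop_cons_of_not_prefix (p : List Char) (ps : List (List Char)) (c : Char)
    (t : List Char) (hp : p ≠ []) (hnp : ¬ p <+: (c :: t)) :
    pvALoop (p :: ps) (c :: t) = pvALoop (p :: ps) t := by
  have hpe : p.isEmpty = false := by simpa [List.isEmpty_iff] using hp
  cases hin : PySem.Chars.isIn p t with
  | false =>
    have h2 : PySem.Chars.isIn p (c :: t) = false := by
      rw [pv_isIn_cons_of_not_prefix p c t hnp, hin]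
    simp [pvALoop, hpe, h2, hin]
  | true =>
    have h2 : PySem.Chars.isIn p (c :: t) = true := by
      rw [pv_isIn_cons_of_not_prefix p c t hnp, hin]
    have hnn : 0 ≤ PySem.Chars.find t p :=
      (PySem.Chars.find_nonneg_iff t p).mpr ((PySem.Chars.isIn_iff_infix p t).mp hin)
    have hf : PySem.Chars.find (c :: t) p = PySem.Chars.find t p + 1 :=
      pv_find_cons_succ p c t hnp hin
    have hs1 : PySem.List.slice (c :: t) (some (PySem.Chars.find (c :: t) p + (p.length : Int))) none
        = PySem.List.slice t (some (PySem.Chars.find t p + (p.length : Int))) none := by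
      rw [hf, PySem.List.slice_from _ (by omega), PySem.List.slice_from _ (by omega)]
      have h1 : (PySem.Chars.find t p + 1 + (p.length : Int)).toNat
          = ((PySem.Chars.find t p + (p.length : Int)).toNat) + 1 := by omega
      rw [h1]
      simp
    simp only [pvALoop, hpe, h2, hin, Bool.not_false, Bool.true_and, Bool.not_true,
      if_true, hs1]

-- the bridge: B's cursor state (k, pos) computes A's loop on the remaining suffixes
theorem pv_bloop_eq_aloop (parts : List (List Char)) (url : List Char) (k pos : Nat) :
    pvBLoop parts url k pos = pvALoop (parts.drop k) (url.drop pos) := by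
  fun_induction pvBLoop parts url k pos with
  | case1 k pos hk part hsw ih =>
    rw [ih, List.drop_eq_getElem_cons hk]
    have hpre : parts[k] <+: url.drop pos := (PySem.Chars.startswith_iff _ _).mp hsw
    by_cases hp : parts[k] = []
    · show pvALoop (List.drop (k + 1) parts) (List.drop (pos + parts[k].length) url) = _
      simp [pvALoop, hp]
    · have hpe : parts[k].isEmpty = false := by simpa [List.isEmpty_iff] using hp
      have hin : PySem.Chars.isIn parts[k] (url.drop pos) = true :=
        (PySem.Chars.isIn_iff_infix _ _).mpr hpre.isInfix
      have hf : PySem.Chars.find (url.drop pos) parts[k] = 0 := pv_find_prefix_zero _ _ hpre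
      have hs : PySem.List.slice (url.drop pos)
          (some (PySem.Chars.find (url.drop pos) parts[k] + (parts[k].length : Int))) none
          = url.drop (pos + parts[k].length) := by
        rw [hf, PySem.List.slice_from _ (by omega), List.drop_drop]
        congr 1
        omega
      show pvALoop (List.drop (k + 1) parts) (List.drop (pos + parts[k].length) url) = _
      simp [pvALoop, hpe, hin, hs]
  | case2 k pos hk part hsw hpos ih =>
    have hsw' : ¬ PySem.Chars.startswith (List.drop pos url) parts[k] = true := hsw
    rw [ih, List.drop_eq_getElem_cons hk]
    have hp : parts[k] ≠ [] := by
      intro he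
      rw [he] at hsw'
      simp [PySem.Chars.startswith_iff] at hsw'
    have hcons : url.drop pos = url[pos] :: url.drop (pos + 1) := List.drop_eq_getElem_cons hpos
    have hnp : ¬ parts[k] <+: (url[pos] :: url.drop (pos + 1)) := by
      rw [← hcons]
      intro hc
      rw [← PySem.Chars.startswith_iff] at hc
      exact hsw' hc
    rw [hcons, pv_aloop_cons_of_not_prefix parts[k] _ _ _ hp hnp]
  | case3 k pos hk part hsw hpos =>
    have hsw' : ¬ PySem.Chars.startswith (List.drop pos url) parts[k] = true := hsw
    have hnil : url.drop pos = [] := List.drop_eq_nil_of_le (by omega)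
    have hp : parts[k] ≠ [] := by
      intro he
      rw [he] at hsw'
      simp [PySem.Chars.startswith_iff] at hsw'
    have hpe : parts[k].isEmpty = false := by simpa [List.isEmpty_iff] using hp
    have hin : PySem.Chars.isIn parts[k] (url.drop pos) = false := by
      rw [hnil, PySem.Chars.isIn_eq_false_iff]
      simpa [List.infix_nil] using hp
    rw [List.drop_eq_getElem_cons hk]
    simp [pvALoop, hpe, hin]
  | case4 k pos hk =>
    rw [List.drop_eq_nil_of_le (by omega)]
    rfl

-- ===== VERDICT (by name: the statement is the Claim_ definition above) =====
theorem match_url_pattern_py_spec : Claim_equal_match_url_pattern_py := by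
  intro url pattern _
  unfold Spec_match_url_pattern_py match_url_pattern_py match_url_pattern_py_alt
  split_ifs with h
  · rw [pv_bloop_eq_aloop]
    simp
  · rfl
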